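-- pv_equiv track=rewrite | github.com/adamhochberger/smite-api | smite_api_wrapper/SmiteApiMethods.py | get_list_of_params
-- ===== SOURCE A (Python) =====
-- def get_list_of_params(method_name: str):
--     list_of_params = []
--
--     temp_string = ""
--     should_read_letters = False
--
--     for char in method_name:
--         if char == "{":
--             should_read_letters = True
--             continue
--
--         if char == "}":
--             should_read_letters = False
--             list_of_params.append(temp_string)
--             temp_string = ""
--
--         if should_read_letters:
--             temp_string += char
--
--     return list_of_params
-- ===== SOURCE B (Python) =====
-- def get_list_of_params(method_name: str):
--     return [''.join(seg.split('{')[1:]) for seg in method_name.split('}')[:-1]]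
-- ===== Notes on version B (the rewrite author's own statement) =====
-- stated objective: simpler
-- what changed: Replaces the per-character flag/accumulator state machine with a split-on-'}' decomposition: for each segment before a '}', emit everything after its first '{' (further '{' dropped) via ''.join(seg.split('{')[1:]).
import Mathlib
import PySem

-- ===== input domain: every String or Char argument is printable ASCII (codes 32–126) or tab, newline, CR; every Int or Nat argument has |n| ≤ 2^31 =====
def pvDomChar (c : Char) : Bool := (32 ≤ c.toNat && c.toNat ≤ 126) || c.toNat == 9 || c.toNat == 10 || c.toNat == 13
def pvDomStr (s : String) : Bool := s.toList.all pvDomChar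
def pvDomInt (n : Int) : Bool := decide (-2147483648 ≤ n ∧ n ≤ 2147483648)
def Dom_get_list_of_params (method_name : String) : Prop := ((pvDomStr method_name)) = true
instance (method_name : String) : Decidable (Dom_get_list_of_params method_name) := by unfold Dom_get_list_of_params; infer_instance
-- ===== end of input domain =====

-- B replaces A's per-character flag/accumulator state machine by a split-on-'}' decomposition
-- (per segment: everything after its first '{', further '{' dropped); simpler, same cost.

-- ===== PORT A =====
-- the for-loop of A: state = (list_of_params = acc, temp_string = temp, should_read_letters = reading)
def getParamsGo (cs : List Char) (acc : List String) (temp : List Char) (reading : Bool) : List String :=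
  match cs with
  | [] => acc
  | c :: rest =>
    if c = '{' then getParamsGo rest acc temp true
    else if c = '}' then getParamsGo rest (acc ++ [String.mk temp]) [] false
    else if reading then getParamsGo rest acc (temp ++ [c]) true
    else getParamsGo rest acc temp false

def get_list_of_params (method_name : String) : List String :=
  getParamsGo method_name.toList [] [] false

-- ===== PORT B =====
-- Source B: [''.join(seg.split('{')[1:]) for seg in method_name.split('}')[:-1]]
def get_list_of_params_alt (method_name : String) : List String :=
  ((method_name.toList.splitOn '}').dropLast).map
    (fun seg => String.mk ((seg.splitOn '{').tail).flatten)

-- ===== PRECONDITION & SPEC =====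
def Spec_get_list_of_params (method_name : String) (out : List String) : Prop := out = get_list_of_params_alt method_name
instance (method_name : String) (out : List String) : Decidable (Spec_get_list_of_params method_name out) := by unfold Spec_get_list_of_params; infer_instance

-- ===== CLAIM (what is proved, stated in full; the proofs are below) =====
def Claim_equal_get_list_of_params : Prop := ∀ (method_name : String), Dom_get_list_of_params method_name → Spec_get_list_of_params method_name (get_list_of_params method_name)

-- ===== LEMMAS AND PROOFS =====

-- what B emits for one '}'-delimited segment
def pvSegOut (seg : List Char) : String := String.mk ((seg.splitOn '{').tail).flatten

-- what A will emit for the segment currently being scanned, given the loop state (temp, reading)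
def pvHead (temp seg : List Char) (reading : Bool) : String :=
  if reading then String.mk (temp ++ (seg.splitOn '{').flatten) else pvSegOut seg

-- everything A still emits from the rest of the input, given the loop state
def pvRest (cs temp : List Char) (reading : Bool) : List String :=
  match (cs.splitOn '}').dropLast with
  | [] => []
  | s0 :: rest => pvHead temp s0 reading :: rest.map pvSegOut

lemma splitOn_cons_char (c a : Char) (cs : List Char) :
    (c :: cs).splitOn a =
      if c = a then [] :: cs.splitOn a else (cs.splitOn a).modifyHead (List.cons c) := by
  simp [List.splitOn, List.splitOnP_cons]

lemma pvRest_modify (c : Char) (cs temp temp' : List Char) (reading reading' : Bool)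
    (hc : c ≠ '}')
    (hhead : ∀ s0, pvHead temp (c :: s0) reading = pvHead temp' s0 reading') :
    pvRest (c :: cs) temp reading = pvRest cs temp' reading' := by
  obtain ⟨s0, rest, hs⟩ := List.exists_cons_of_ne_nil (List.splitOnP_ne_nil (· == '}') cs)
  have hsplit : cs.splitOn '}' = s0 :: rest := hs
  unfold pvRest
  rw [splitOn_cons_char, if_neg hc, hsplit]
  cases rest with
  | nil => simp
  | cons r1 rs => simp [List.dropLast_cons₂, hhead]

lemma pvRest_false (cs : List Char) :
    pvRest cs [] false = ((cs.splitOn '}').dropLast).map pvSegOut := by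
  unfold pvRest
  cases h : (cs.splitOn '}').dropLast with
  | nil => rfl
  | cons s0 rest => simp [pvHead]

lemma getParamsGo_eq (cs : List Char) :
    ∀ (acc : List String) (temp : List Char) (reading : Bool),
      (reading = false → temp = []) →
      getParamsGo cs acc temp reading = acc ++ pvRest cs temp reading := by
  induction cs with
  | nil =>
    intro acc temp reading _
    simp [getParamsGo, pvRest]
  | cons c rest ih =>
    intro acc temp reading h
    by_cases hopen : c = '{'
    · rw [getParamsGo, if_pos hopen, ih acc temp true (by simp)]
      subst hopen
      congr 1
      refine (pvRest_modify _ _ _ _ _ _ (by decide) ?_).symm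
      intro s0
      cases reading with
      | false =>
        simp [pvHead, pvSegOut, splitOn_cons_char, h rfl]
      | true => simp [pvHead, splitOn_cons_char]
    · by_cases hclose : c = '}'
      · rw [getParamsGo, if_neg hopen, if_pos hclose,
          ih (acc ++ [String.mk temp]) [] false (by simp)]
        subst hclose
        have hhd : pvRest ('}' :: rest) temp reading
            = String.mk temp :: ((rest.splitOn '}').dropLast).map pvSegOut := by
          obtain ⟨s0, rs, hs⟩ := List.exists_cons_of_ne_nil (List.splitOnP_ne_nil (· == '}') rest)
          have hsplit : rest.splitOn '}' = s0 :: rs := hs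
          unfold pvRest
          rw [splitOn_cons_char, if_pos rfl, hsplit, List.dropLast_cons₂]
          cases reading with
          | false => simp [pvHead, pvSegOut, h rfl]
          | true =>
            simp only [pvHead]
            cases rs with
            | nil => simp
            | cons r1 rs' => simp [pvSegOut, List.dropLast_cons₂]
        rw [hhd, pvRest_false]
        simp
      · rw [getParamsGo, if_neg hopen, if_neg hclose]
        cases reading with
        | false =>
          rw [if_neg (by simp), ih acc temp false h]
          congr 1
          refine (pvRest_modify _ _ _ _ _ _ hclose ?_).symm
          intro s0
          simp [pvHead, pvSegOut, splitOn_cons_char, hopen]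
        | true =>
          rw [if_pos rfl, ih acc (temp ++ [c]) true (by simp)]
          congr 1
          refine (pvRest_modify _ _ _ _ _ _ hclose ?_).symm
          intro s0
          obtain ⟨t0, ts, ht⟩ := List.exists_cons_of_ne_nil (List.splitOnP_ne_nil (· == '{') s0)
          have hsplit : s0.splitOn '{' = t0 :: ts := ht
          simp [pvHead, splitOn_cons_char, hopen, hsplit]

-- ===== VERDICT (by name: the statement is the Claim_ definition above) =====
theorem get_list_of_params_spec : Claim_equal_get_list_of_params := by
  intro s _
  unfold Spec_get_list_of_params get_list_of_params get_list_of_params_alt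
  rw [getParamsGo_eq s.toList [] [] false (fun _ => rfl), pvRest_false]
  simp only [List.nil_append]
  rfl
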